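-- pv_equiv track=rewrite | github.com/jsnider3/JavaWorkspace | Competitive/Python/hacklib.py | assign_candies
-- ===== SOURCE A (Python) =====
-- def assign_candies(arr):
--   ''' Given a list of numbers. Assign a number to each
--       such that if a number is bigger than a neighbor
--       it has more candies than it. Return the minimal amount
--       of candy. From https://www.hackerrank.com/challenges/candies.'''
--   candies = 1
--   downtrend = 1
--   uptrend = 1
--   prev = arr[0]
--   prevCandies = [1]
--   for candy in arr[1:]:
--     if candy == prev:
--       downtrend = 1
--       uptrend = 1
--       candies += 1
--       prevCandies = [1]
--     elif candy < prev:
--       prevCandies.append(1)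
--       candies += 1
--       for ind in reversed(range(1, len(prevCandies))):
--         if prevCandies[ind] == prevCandies[ind-1]:
--           prevCandies[ind-1]+= 1
--           candies += 1
--       uptrend = 1
--     elif candy > prev:
--       downtrend = 1
--       uptrend += 1
--       candies += uptrend
--       prevCandies = [uptrend]
--     prev = candy
--   return candies
-- ===== SOURCE B (Python) =====
-- def assign_candies(arr):
--   ''' One-pass O(n): track lengths of the current increasing run (up) and
--       decreasing run (down) and the candies at the run's peak; extending a
--       descent adds `down` candies (one for the new element, one for each
--       non-peak element of the run) plus one more when the peak must rise.'''
--   total = 1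
--   up = 1
--   down = 1
--   peak = 1
--   prev = arr[0]
--   for x in arr[1:]:
--     if x > prev:
--       up += 1
--       down = 1
--       peak = up
--       total += up
--     elif x == prev:
--       up = 1
--       down = 1
--       peak = 1
--       total += 1
--     else:
--       total += down
--       if peak == down:
--         peak += 1
--         total += 1
--       down += 1
--       up = 1
--     prev = x
--   return total
-- ===== Notes on version B (the rewrite author's own statement) =====
-- stated objective: faster
-- what changed: Replaces A's per-element candy list with its O(n^2) backward cascade on every descent by a single pass keeping only run lengths (up, down) and the peak's candy count, adding the cascade's effect in closed form.
import Mathlib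
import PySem

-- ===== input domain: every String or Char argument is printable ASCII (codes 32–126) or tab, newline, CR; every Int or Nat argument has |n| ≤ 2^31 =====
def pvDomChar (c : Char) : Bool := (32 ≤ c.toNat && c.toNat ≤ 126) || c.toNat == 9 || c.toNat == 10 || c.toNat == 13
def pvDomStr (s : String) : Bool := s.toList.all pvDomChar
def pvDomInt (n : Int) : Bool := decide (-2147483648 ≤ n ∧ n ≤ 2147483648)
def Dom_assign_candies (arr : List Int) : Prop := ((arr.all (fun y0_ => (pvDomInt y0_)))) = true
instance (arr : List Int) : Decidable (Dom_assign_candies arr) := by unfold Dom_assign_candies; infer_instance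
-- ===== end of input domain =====

-- B replaces A's candy list and its quadratic backward cascade by a one-pass
-- closed form over run lengths; proved equal on all nonempty lists.

-- ===== PORT A =====
-- inner loop body: 'if prevCandies[ind] == prevCandies[ind-1]: prevCandies[ind-1] += 1; candies += 1'
def pvInnerA (st : List Int × Int) (ind : Int) : List Int × Int :=
  if PySem.List.pyGetD st.1 ind 0 = PySem.List.pyGetD st.1 (ind - 1) 0 then
    (st.1.set (ind - 1).toNat (PySem.List.pyGetD st.1 (ind - 1) 0 + 1), st.2 + 1)
  else st

-- loop body over 'for candy in arr[1:]'; state = (candies, downtrend, uptrend, prev, prevCandies)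
def pvStepA (st : Int × Int × Int × Int × List Int) (candy : Int) : Int × Int × Int × Int × List Int :=
  let candies := st.1
  let downtrend := st.2.1
  let uptrend := st.2.2.1
  let prev := st.2.2.2.1
  let pc := st.2.2.2.2
  if candy = prev then (candies + 1, 1, 1, candy, [1])
  else if candy < prev then
    let pc1 := pc ++ [1]
    let r := ((PySem.List.pyRange 1 (pc1.length : Int) 1).reverse).foldl pvInnerA (pc1, candies + 1)
    (r.2, downtrend, 1, candy, r.1)
  else (candies + (uptrend + 1), 1, uptrend + 1, candy, [uptrend + 1])

def assign_candies (arr : List Int) : Int :=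
  match arr with
  | [] => 0      -- arr[0] raises IndexError in Python; excluded by Pre_
  | a :: rest => (rest.foldl pvStepA (1, 1, 1, a, [1])).1

-- ===== PORT B =====
-- state = (total, up, down, peak, prev)
def pvStepB (st : Int × Int × Int × Int × Int) (x : Int) : Int × Int × Int × Int × Int :=
  let total := st.1
  let up := st.2.1
  let down := st.2.2.1
  let peak := st.2.2.2.1
  let prev := st.2.2.2.2
  if x > prev then (total + (up + 1), up + 1, 1, up + 1, x)
  else if x = prev then (total + 1, 1, 1, 1, x)
  else
    let total1 := total + down
    let pt := if peak = down then (peak + 1, total1 + 1) else (peak, total1)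
    (pt.2, 1, down + 1, pt.1, x)

def assign_candies_alt (arr : List Int) : Int :=
  match arr with
  | [] => 0      -- arr[0] raises IndexError in Python; excluded by Pre_
  | a :: rest => (rest.foldl pvStepB (1, 1, 1, 1, a)).1

-- ===== PRECONDITION & SPEC =====
-- Pre_ excludes only the empty list, on which A (arr[0]) raises IndexError.
def Pre_assign_candies (arr : List Int) : Prop := arr ≠ []
instance (arr : List Int) : Decidable (Pre_assign_candies arr) := by
  unfold Pre_assign_candies; infer_instance

def pvWitness_assign_candies : List Int := [2, 1, 3]

def Spec_assign_candies (arr : List Int) (out : Int) : Prop := out = assign_candies_alt arr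
instance (arr : List Int) (out : Int) : Decidable (Spec_assign_candies arr out) := by unfold Spec_assign_candies; infer_instance

-- ===== CLAIM (what is proved, stated in full; the proofs are below) =====
def Claim_equal_assign_candies : Prop := ∀ (arr : List Int), Dom_assign_candies arr → Pre_assign_candies arr → Spec_assign_candies arr (assign_candies arr)

-- ===== LEMMAS AND PROOFS =====

-- [d, d-1, ..., 1] : the candies of the non-peak part of A's current descending run
def pvDesc : Nat → List Int
  | 0 => []
  | n + 1 => ((n : Int) + 1) :: pvDesc n

-- A's cascade, written as structural recursion from the right end of the list
def pvCasc : List Int → List Int × Int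
  | [] => ([], 0)
  | x :: xs =>
    match pvCasc xs with
    | ([], n) => ([x], n)
    | (y :: ys, n) => if y = x then ((x + 1) :: y :: ys, n + 1) else (x :: y :: ys, n)

lemma pvCasc_cons_nil {xs : List Int} {n : Int} (x : Int) (h : pvCasc xs = ([], n)) :
    pvCasc (x :: xs) = ([x], n) := by
  simp only [pvCasc, h]

lemma pvCasc_cons_cons {xs ys : List Int} {y n : Int} (x : Int) (h : pvCasc xs = (y :: ys, n)) :
    pvCasc (x :: xs) = if y = x then ((x + 1) :: y :: ys, n + 1) else (x :: y :: ys, n) := by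
  simp only [pvCasc, h]

lemma pvCasc_length (xs : List Int) : (pvCasc xs).1.length = xs.length := by
  induction xs with
  | nil => simp [pvCasc]
  | cons x xs ih =>
    rcases h : pvCasc xs with ⟨_ | ⟨y, ys⟩, n⟩
    · rw [pvCasc_cons_nil x h]
      rw [h] at ih
      simp_all
    · rw [pvCasc_cons_cons x h]
      rw [h] at ih
      by_cases hy : y = x <;> simp [hy] at ih ⊢ <;> omega

lemma pvInnerA_cons (x : Int) (pc : List Int) (c i : Int) (hi : 2 ≤ i) :
    pvInnerA (x :: pc, c) i =
      ((x :: (pvInnerA (pc, c) (i - 1)).1), (pvInnerA (pc, c) (i - 1)).2) := by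
  lift i to ℕ using (by omega : (0:Int) ≤ i) with n
  have h1 : PySem.List.pyGetD (x :: pc) (n : Int) 0 = PySem.List.pyGetD pc ((n : Int) - 1) 0 := by
    rw [PySem.List.pyGetD_natCast]
    rw [show ((n : Int) - 1) = (((n - 1 : Nat) : Int)) from by omega, PySem.List.pyGetD_natCast]
    rcases Nat.exists_eq_add_of_le (show 1 ≤ n by omega) with ⟨k, hk⟩
    simp [hk, List.getD, Nat.add_comm]
  have h0 : PySem.List.pyGetD (x :: pc) ((n : Int) - 1) 0 = PySem.List.pyGetD pc ((n : Int) - 2) 0 := by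
    rw [show ((n : Int) - 1) = (((n - 1 : Nat) : Int)) from by omega, PySem.List.pyGetD_natCast]
    rw [show ((n : Int) - 2) = (((n - 2 : Nat) : Int)) from by omega, PySem.List.pyGetD_natCast]
    rcases Nat.exists_eq_add_of_le (show 2 ≤ n by omega) with ⟨k, hk⟩
    simp [hk, List.getD, Nat.add_comm]
  have hset : ((n : Int) - 1).toNat = ((n : Int) - 2).toNat + 1 := by omega
  simp only [pvInnerA, h1, h0]
  have hii : ((n : Int) - 1) - 1 = (n : Int) - 2 := by omega
  rw [hii]
  by_cases hc : PySem.List.pyGetD pc ((n : Int) - 1) 0 = PySem.List.pyGetD pc ((n : Int) - 2) 0 <;>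
    simp [hc, hset]

-- the loop over indices ≥ 2 leaves the head alone and acts shifted on the tail
lemma pvFoldl_shift (J : List Int) (hJ : ∀ i ∈ J, 2 ≤ i) (x : Int) (pc : List Int) (c : Int) :
    J.foldl pvInnerA (x :: pc, c) =
      ((x :: (J.map (· - 1) |>.foldl pvInnerA (pc, c)).1),
        ((J.map (· - 1)).foldl pvInnerA (pc, c)).2) := by
  induction J generalizing pc c with
  | nil => simp
  | cons i J ih =>
    have hi : 2 ≤ i := hJ i (by simp)
    simp only [List.foldl_cons, List.map_cons]
    rw [pvInnerA_cons x pc c i hi]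
    exact ih (fun j hj => hJ j (by simp [hj])) _ _

lemma pvMap_sub_pyRange (k : Nat) :
    (PySem.List.pyRange 2 (2 + (k : Int)) 1).map (· - 1) = PySem.List.pyRange 1 (1 + (k : Int)) 1 := by
  induction k with
  | zero =>
    rw [show (2 : Int) + ((0 : Nat) : Int) = 2 from by norm_num,
        show (1 : Int) + ((0 : Nat) : Int) = 1 from by norm_num,
        PySem.List.pyRange_one_eq_nil (by omega), PySem.List.pyRange_one_eq_nil (by omega)]
    simp
  | succ n ih =>
    have h2 : (2 : Int) + (n + 1 : Nat) = (2 + (n : Int)) + 1 := by push_cast; ring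
    have h1 : (1 : Int) + (n + 1 : Nat) = (1 + (n : Int)) + 1 := by push_cast; ring
    rw [h2, h1, PySem.List.pyRange_one_succ_right (by omega), PySem.List.pyRange_one_succ_right (by omega)]
    simp only [List.map_append, List.map_cons, List.map_nil, ih]
    congr 2
    omega

-- the transliterated index loop computes pvCasc
lemma pvLoop_eq_casc (pc : List Int) (c : Int) :
    ((PySem.List.pyRange 1 (pc.length : Int) 1).reverse).foldl pvInnerA (pc, c) =
      ((pvCasc pc).1, c + (pvCasc pc).2) := by
  induction pc generalizing c with
  | nil => simp [PySem.List.pyRange_one_eq_nil, pvCasc]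
  | cons x xs ih =>
    cases xs with
    | nil => simp [PySem.List.pyRange_one_eq_nil, pvCasc]
    | cons y ys =>
      -- length = |ys| + 2; indices reversed = (pyRange 2 len).reverse ++ [1]
      have hlen : ((x :: y :: ys).length : Int) = 2 + (ys.length : Int) := by
        simp; ring
      have hsplit : PySem.List.pyRange 1 ((x :: y :: ys).length : Int) 1 =
          1 :: PySem.List.pyRange 2 (2 + (ys.length : Int)) 1 := by
        rw [hlen, PySem.List.pyRange_one_cons (by omega)]
        norm_num
      rw [hsplit]
      simp only [List.reverse_cons, List.foldl_append, List.foldl_cons, List.foldl_nil]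
      rw [pvFoldl_shift _ (fun i hi => by
            simp only [List.mem_reverse, PySem.List.mem_pyRange_one] at hi; omega)]
      rw [List.map_reverse, pvMap_sub_pyRange]
      have hylen : (1 : Int) + (ys.length : Int) = ((y :: ys).length : Int) := by simp; ring
      rw [hylen, ih c]
      -- final step at index 1 on (x :: cascaded tail)
      rcases hz : pvCasc (y :: ys) with ⟨_ | ⟨z, zs⟩, m⟩
      · have := pvCasc_length (y :: ys)
        rw [hz] at this
        simp at this
      · simp only [pvInnerA]
        have hg1 : PySem.List.pyGetD (x :: z :: zs) 1 0 = z := by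
          rw [show (1 : Int) = ((1 : Nat) : Int) from rfl, PySem.List.pyGetD_natCast]
          simp [List.getD]
        have hg0 : PySem.List.pyGetD (x :: z :: zs) (1 - 1) 0 = x := by
          norm_num [PySem.List.pyGetD_zero_cons]
        simp only [hg1, hg0]
        rw [pvCasc_cons_cons x hz]
        by_cases hzx : z = x <;> simp [hzx] <;> try ring

lemma pvCasc_desc (k : Nat) : pvCasc (pvDesc k ++ [1]) = (pvDesc (k + 1), (k : Int)) := by
  induction k with
  | zero => simp [pvDesc, pvCasc]
  | succ n ih =>
    show pvCasc ((((n : Int) + 1) :: pvDesc n) ++ [1]) = _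
    rw [List.cons_append, pvCasc_cons_cons _ (show pvCasc (pvDesc n ++ [1]) = (((n : Int) + 1) :: pvDesc n, (n : Int)) from ih)]
    rw [if_pos rfl]
    show ((((n : Int) + 1) + 1) :: pvDesc (n + 1), (n : Int) + 1) = (pvDesc (n + 2), ((n + 1 : Nat) : Int))
    have : pvDesc (n + 2) = (((n + 1 : Nat) : Int) + 1) :: pvDesc (n + 1) := rfl
    rw [this]
    norm_num

lemma pvCasc_peak (p : Int) (k : Nat) :
    pvCasc (p :: (pvDesc k ++ [1])) =
      (if (k : Int) + 1 = p then ((p + 1) :: pvDesc (k + 1), (k : Int) + 1)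
       else (p :: pvDesc (k + 1), (k : Int))) := by
  have hd : pvCasc (pvDesc k ++ [1]) = (((k : Int) + 1) :: pvDesc k, (k : Int)) := pvCasc_desc k
  rw [pvCasc_cons_cons p hd]
  by_cases h : (k : Int) + 1 = p <;> simp [h, pvDesc]

-- the simulation relation between A's state and B's state
def pvRel (a : Int × Int × Int × Int × List Int) (b : Int × Int × Int × Int × Int) : Prop :=
  ∃ dn : Nat, a = (b.1, 1, b.2.1, b.2.2.2.2, b.2.2.2.1 :: pvDesc dn) ∧ b.2.2.1 = (dn : Int) + 1

lemma pvStep_rel (c ut prev peak : Int) (dn : Nat) (x : Int) :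
    pvRel (pvStepA (c, 1, ut, prev, peak :: pvDesc dn) x)
          (pvStepB (c, ut, (dn : Int) + 1, peak, prev) x) := by
  rcases lt_trichotomy x prev with hlt | heq | hgt
  · -- descent: A's cascade vs B's closed form
    have hne : ¬ (x = prev) := ne_of_lt hlt
    have hng : ¬ (x > prev) := by omega
    by_cases hp : (dn : Int) + 1 = peak
    · have key := pvLoop_eq_casc (peak :: (pvDesc dn ++ [1])) (c + 1)
      rw [pvCasc_peak, if_pos hp] at key
      simp only [pvStepA, pvStepB, if_neg hne, if_pos hlt, if_neg hng, if_pos hp.symm,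
        List.cons_append, key]
      exact ⟨dn + 1, by simp [Prod.ext_iff]; omega, by push_cast; ring⟩
    · have hp' : ¬ (peak = (dn : Int) + 1) := fun h => hp h.symm
      have key := pvLoop_eq_casc (peak :: (pvDesc dn ++ [1])) (c + 1)
      rw [pvCasc_peak, if_neg hp] at key
      simp only [pvStepA, pvStepB, if_neg hne, if_pos hlt, if_neg hng, if_neg hp',
        List.cons_append, key]
      exact ⟨dn + 1, by simp [Prod.ext_iff]; omega, by push_cast; ring⟩
  · have hng : ¬ (x > prev) := by omega
    simp only [pvStepA, pvStepB, if_pos heq, if_neg hng]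
    exact ⟨0, by simp [pvDesc], by norm_num⟩
  · have hne : ¬ (x = prev) := by omega
    have hnl : ¬ (x < prev) := by omega
    simp only [pvStepA, pvStepB, if_neg hne, if_neg hnl, if_pos hgt]
    exact ⟨0, by simp [pvDesc], by norm_num⟩

lemma pvFoldl_rel (rest : List Int) (a : Int × Int × Int × Int × List Int)
    (b : Int × Int × Int × Int × Int) (h : pvRel a b) :
    (rest.foldl pvStepA a).1 = (rest.foldl pvStepB b).1 := by
  induction rest generalizing a b with
  | nil =>
    obtain ⟨dn, ha, -⟩ := h
    rw [ha]
    rfl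
  | cons x xs ih =>
    obtain ⟨dn, ha, hb⟩ := h
    obtain ⟨t, up, down, peak, prev⟩ := b
    simp only at ha hb
    subst ha hb
    exact ih _ _ (pvStep_rel t up prev peak dn x)

-- ===== VERDICT (by name: the statement is the Claim_ definition above) =====
theorem assign_candies_spec : Claim_equal_assign_candies := by
  intro arr _ hpre
  unfold Spec_assign_candies
  cases arr with
  | nil => exact absurd rfl hpre
  | cons a rest =>
    show (rest.foldl pvStepA (1, 1, 1, a, [1])).1 = (rest.foldl pvStepB (1, 1, 1, 1, a)).1
    exact pvFoldl_rel rest _ _ ⟨0, by simp [pvDesc], by norm_num⟩
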